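-- pv_equiv track=rewrite | github.com/robmcmullen/omnivore | atrip/atrip/stringifiers/basic_data.py | calc_text
-- ===== SOURCE A (Python) =====
-- import textwrap
--
-- def calc_text(byte_data):
--     lines = []
--     start_line = "DATA "
--     line_length = 38 - len(start_line)
--     values = " ".join([str(int(i)) for i in byte_data])
--     lines = textwrap.wrap(values, line_length)
--     lines = [start_line + line.replace(" ", ",") for line in lines]
--     text = "\n".join(lines)
--     return text
-- ===== SOURCE B (Python) =====
-- def calc_text(byte_data):
--     nums = [str(int(b)) for b in byte_data]
--     lines = []
--     cur = []
--     cur_len = 0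
--     for n in nums:
--         if not cur:
--             cur = [n]
--             cur_len = len(n)
--         elif cur_len + 1 + len(n) <= 33:
--             cur.append(n)
--             cur_len += 1 + len(n)
--         else:
--             lines.append(cur)
--             cur = [n]
--             cur_len = len(n)
--     if cur:
--         lines.append(cur)
--     return "\n".join("DATA " + ",".join(line) for line in lines)
-- ===== Notes on version B (the rewrite author's own statement) =====
-- stated objective: simpler
-- what changed: Replaces building one big space-joined string, textwrap.wrap's chunk splitting/greedy refill, and a per-line comma substitution by a single direct greedy packing loop over the decimal strings that tracks the running line width and emits comma-joined DATA lines.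
import Mathlib
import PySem

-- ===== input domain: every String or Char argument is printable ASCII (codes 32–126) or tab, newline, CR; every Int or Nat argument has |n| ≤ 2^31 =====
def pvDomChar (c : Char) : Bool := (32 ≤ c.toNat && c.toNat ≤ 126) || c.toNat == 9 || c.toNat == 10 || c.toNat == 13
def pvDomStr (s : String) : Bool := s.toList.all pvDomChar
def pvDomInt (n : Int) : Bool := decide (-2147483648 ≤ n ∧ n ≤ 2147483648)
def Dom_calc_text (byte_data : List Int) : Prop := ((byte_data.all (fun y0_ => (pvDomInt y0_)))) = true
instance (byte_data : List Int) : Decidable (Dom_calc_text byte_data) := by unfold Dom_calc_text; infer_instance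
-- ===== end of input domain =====

-- B replaces the space-join + textwrap.wrap + per-line comma substitution of A by one direct
-- greedy line-packing loop over the decimal strings (objective: simpler; same return value).


-- ===== PORT A =====
-- A calls textwrap.wrap, which PySem does not cover, so it is ported by hand below
-- (pvSplitChunks = textwrap's chunk splitter, pvStepA/pvWrapCore = its greedy refill loop
-- with drop_whitespace). The hand port is exact for the texts A feeds it: words made of
-- digits and '-', separated by single ' ' (no tabs, no hyphen-letter breaks, no words
-- longer than the width, whitespace-only text never reaching a line start).
def pvIsSp (c : Char) : Bool := c == ' '

def pvWsChunk (ch : List Char) : Bool := ch.all pvIsSp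

-- textwrap's splitter: maximal runs of whitespace / non-whitespace characters
def pvSplitChunks : List Char → List (List Char)
  | [] => []
  | c :: rest =>
    (c :: rest.takeWhile (fun x => pvIsSp x == pvIsSp c))
      :: pvSplitChunks (rest.dropWhile (fun x => pvIsSp x == pvIsSp c))
termination_by cs => cs.length
decreasing_by
  have := List.length_dropWhile_le (fun x => pvIsSp x == pvIsSp c) rest
  simp
  omega

-- drop a trailing whitespace chunk from the current line (textwrap's drop_whitespace)
def pvDropTrailWs (cur : List (List Char)) : List (List Char) :=
  match cur.getLast? with
  | some ch => if pvWsChunk ch then cur.dropLast else cur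
  | none => cur

-- one step of textwrap's greedy loop: append the chunk if it fits, else emit the
-- current line (trailing whitespace dropped) and start a new one (leading whitespace dropped)
def pvStepA (width : Nat) (st : List (List Char) × List (List Char) × Nat) (ch : List Char) :
    List (List Char) × List (List Char) × Nat :=
  match st with
  | (lines, cur, curlen) =>
    if curlen + ch.length ≤ width then (lines, cur ++ [ch], curlen + ch.length)
    else
      let cur' := pvDropTrailWs cur
      let lines' := if cur'.isEmpty then lines else lines ++ [PySem.Chars.join [] cur']
      if pvWsChunk ch then (lines', [], 0) else (lines', [ch], ch.length)

def pvWrapCore (width : Nat) (st : List (List Char) × List (List Char) × Nat)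
    (chunks : List (List Char)) : List (List Char) :=
  match chunks.foldl (pvStepA width) st with
  | (lines, cur, _) =>
    let cur' := pvDropTrailWs cur
    if cur'.isEmpty then lines else lines ++ [PySem.Chars.join [] cur']

def calc_text (byte_data : List Int) : String :=
  let start_line := "DATA ".toList
  let line_length := 38 - start_line.length
  let values := PySem.Chars.join [' '] (byte_data.map (fun i => PySem.Int.toChars i))
  let lines := pvWrapCore line_length ([], [], 0) (pvSplitChunks values)
  let lines2 := lines.map (fun line => start_line ++ PySem.Chars.replace line [' '] [','])
  String.ofList (PySem.Chars.join ['\n'] lines2)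

-- ===== PORT B =====
-- one step of B's packing loop over the decimal strings
def pvStepB (st : List (List (List Char)) × List (List Char) × Nat) (n : List Char) :
    List (List (List Char)) × List (List Char) × Nat :=
  match st with
  | (lines, cur, cur_len) =>
    if cur.isEmpty then (lines, [n], n.length)
    else if cur_len + 1 + n.length ≤ 33 then (lines, cur ++ [n], cur_len + 1 + n.length)
    else (lines ++ [cur], [n], n.length)

def pvPackB (st : List (List (List Char)) × List (List Char) × Nat)
    (nums : List (List Char)) : List (List (List Char)) :=
  match nums.foldl pvStepB st with
  | (lines, cur, _) => if cur.isEmpty then lines else lines ++ [cur]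

def calc_text_alt (byte_data : List Int) : String :=
  let nums := byte_data.map (fun b => PySem.Int.toChars b)
  let lines := pvPackB ([], [], 0) nums
  String.ofList (PySem.Chars.join ['\n']
    (lines.map (fun line => "DATA ".toList ++ PySem.Chars.join [','] line)))

-- ===== PRECONDITION & SPEC =====
def Spec_calc_text (byte_data : List Int) (out : String) : Prop := out = calc_text_alt byte_data
instance (byte_data : List Int) (out : String) : Decidable (Spec_calc_text byte_data out) := by unfold Spec_calc_text; infer_instance

-- ===== CLAIM (what is proved, stated in full; the proofs are below) =====
def Claim_equal_calc_text : Prop := ∀ (byte_data : List Int), Dom_calc_text byte_data → Spec_calc_text byte_data (calc_text byte_data)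

-- ===== LEMMAS AND PROOFS =====

theorem pv_intersperse_cc {α : Type} (s a b : α) (l : List α) :
    List.intersperse s (a :: b :: l) = a :: s :: List.intersperse s (b :: l) := rfl

theorem pv_intersperse_concat {α : Type} (s : α) (xs : List α) (y : α) (h : xs ≠ []) :
    List.intersperse s (xs ++ [y]) = List.intersperse s xs ++ [s, y] := by
  induction xs with
  | nil => exact absurd rfl h
  | cons x xs ih =>
    cases xs with
    | nil => rfl
    | cons x' xs' =>
      calc List.intersperse s ((x :: x' :: xs') ++ [y])
          = x :: s :: List.intersperse s ((x' :: xs') ++ [y]) := rfl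
        _ = x :: s :: (List.intersperse s (x' :: xs') ++ [s, y]) := by rw [ih (by simp)]
        _ = List.intersperse s (x :: x' :: xs') ++ [s, y] := rfl

theorem pv_getLast?_intersperse {α : Type} (s : α) (xs : List α) :
    (List.intersperse s xs).getLast? = xs.getLast? := by
  match xs with
  | [] => rfl
  | [x] => rfl
  | x :: x' :: rest =>
    cases rest with
    | nil => rfl
    | cons r rs =>
      rw [pv_intersperse_cc, pv_intersperse_cc, List.getLast?_cons_cons, List.getLast?_cons_cons,
        ← pv_intersperse_cc, pv_getLast?_intersperse s (x' :: r :: rs)]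
      simp [List.getLast?_cons_cons]

theorem pv_flatten_intersperse_nil {α : Type} (xs : List (List α)) :
    (List.intersperse ([] : List α) xs).flatten = xs.flatten := by
  match xs with
  | [] => rfl
  | [x] => rfl
  | x :: x' :: rest =>
    calc (List.intersperse ([] : List α) (x :: x' :: rest)).flatten
        = x ++ (List.intersperse ([] : List α) (x' :: rest)).flatten := by
          rw [pv_intersperse_cc]; simp
      _ = x ++ (x' :: rest).flatten := by rw [pv_flatten_intersperse_nil (x' :: rest)]
      _ = (x :: x' :: rest).flatten := by simp

theorem pv_join_nil_eq_flatten (l : List (List Char)) :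
    PySem.Chars.join [] l = l.flatten := by
  simp [PySem.Chars.join, List.intercalate, pv_flatten_intersperse_nil]

theorem pv_map_intersperse {α β : Type} (f : α → β) (s : α) (l : List α) :
    (List.intersperse s l).map f = List.intersperse (f s) (l.map f) := by
  match l with
  | [] => rfl
  | [x] => rfl
  | x :: x' :: rest =>
    rw [pv_intersperse_cc]
    simp only [List.map_cons]
    rw [pv_map_intersperse f s (x' :: rest)]
    rfl

theorem pv_intercalate_words (ws : List (List Char)) (w : List Char) :
    List.intercalate [' '] (w :: ws) = w ++ ws.flatMap (fun u => ' ' :: u) := by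
  induction ws generalizing w with
  | nil => simp [List.intercalate]
  | cons u ws ih =>
    calc List.intercalate [' '] (w :: u :: ws)
        = (List.intersperse [' '] (w :: u :: ws)).flatten := rfl
      _ = w ++ ' ' :: (List.intersperse [' '] (u :: ws)).flatten := by
          rw [pv_intersperse_cc]; simp
      _ = w ++ ' ' :: List.intercalate [' '] (u :: ws) := rfl
      _ = w ++ ' ' :: (u ++ ws.flatMap (fun v => ' ' :: v)) := by rw [ih u]
      _ = w ++ (u :: ws).flatMap (fun v => ' ' :: v) := by simp


-- a "good" word: nonempty, space-free, and at most 33 characters wide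
def pvGood (w : List Char) : Prop := w ≠ [] ∧ (∀ c ∈ w, c ≠ ' ') ∧ w.length ≤ 33

theorem pv_ne_space_of_isDigit {c : Char} (h : c.isDigit = true) : c ≠ ' ' := by
  intro h'; subst h'; exact absurd h (by decide)

theorem pvGood_toChars (n : Int) (h : pvDomInt n = true) : pvGood (PySem.Int.toChars n) := by
  have hb : -2147483648 ≤ n ∧ n ≤ 2147483648 := by simpa [pvDomInt] using h
  have h32 : (10 : Nat) ^ 32 = 100000000000000000000000000000000 := by norm_num
  have h33 : (10 : Nat) ^ 33 = 1000000000000000000000000000000000 := by norm_num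
  unfold PySem.Int.toChars pvGood
  split
  · refine ⟨by simp, ?_, ?_⟩
    · intro c hc
      rcases List.mem_cons.mp hc with rfl | hc
      · decide
      · exact pv_ne_space_of_isDigit (Nat.isDigit_of_mem_toDigits (by norm_num) (by norm_num) hc)
    · have hlt : n.natAbs < 10 ^ 32 := by rw [h32]; omega
      have := (Nat.length_toDigits_le_iff (b := 10) (n := n.natAbs) (k := 32)
        (by norm_num) (by norm_num)).mpr hlt
      simp only [List.length_cons]
      omega
  · refine ⟨?_, ?_, ?_⟩
    · have := @Nat.length_toDigits_pos 10 n.toNat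
      intro h'; rw [h'] at this; simp at this
    · intro c hc
      exact pv_ne_space_of_isDigit (Nat.isDigit_of_mem_toDigits (by norm_num) (by norm_num) hc)
    · have hlt : n.toNat < 10 ^ 33 := by rw [h33]; omega
      exact le_trans ((Nat.length_toDigits_le_iff (b := 10) (n := n.toNat) (k := 33)
        (by norm_num) (by norm_num)).mpr hlt) (by norm_num)

-- takeWhile/dropWhile over a space-free prefix
theorem pv_takeWhile_nosp (t rest : List Char) (h : ∀ c ∈ t, c ≠ ' ') :
    (t ++ rest).takeWhile (fun x => !(x == ' ')) = t ++ rest.takeWhile (fun x => !(x == ' ')) := by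
  induction t with
  | nil => simp
  | cons c t ih =>
    have hc : (c == ' ') = false := by
      simpa using h c (List.mem_cons_self ..)
    simp only [List.cons_append, List.takeWhile_cons, hc]
    simp [ih (fun x hx => h x (List.mem_cons_of_mem _ hx))]

theorem pv_dropWhile_nosp (t rest : List Char) (h : ∀ c ∈ t, c ≠ ' ') :
    (t ++ rest).dropWhile (fun x => !(x == ' ')) = rest.dropWhile (fun x => !(x == ' ')) := by
  induction t with
  | nil => simp
  | cons c t ih =>
    have hc : (c == ' ') = false := by
      simpa using h c (List.mem_cons_self ..)
    simp only [List.cons_append, List.dropWhile_cons, hc]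
    simp [ih (fun x hx => h x (List.mem_cons_of_mem _ hx))]

-- the chunk list of single-space-separated good words
theorem pv_chunks_word_step (c : Char) (t rest : List Char) (hc : c ≠ ' ')
    (ht : ∀ x ∈ t, x ≠ ' ') (hrest : rest = [] ∨ ∃ r, rest = ' ' :: r) :
    pvSplitChunks (c :: (t ++ rest)) = (c :: t) :: pvSplitChunks rest := by
  have hpc : (c == ' ') = false := by simpa using hc
  have hfun : (fun x => pvIsSp x == pvIsSp c) = (fun x : Char => !(x == ' ')) := by
    funext x
    rw [pvIsSp, pvIsSp, hpc]
    cases h : (x == ' ') <;> simp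
  rw [pvSplitChunks, hfun]
  rw [pv_takeWhile_nosp t rest ht, pv_dropWhile_nosp t rest ht]
  rcases hrest with rfl | ⟨r, rfl⟩
  · simp
  · simp

theorem pv_chunks_space_step (l : List Char)
    (hl : l = [] ∨ ∃ c t, l = c :: t ∧ c ≠ ' ') :
    pvSplitChunks (' ' :: l) = [' '] :: pvSplitChunks l := by
  have hfun : (fun x => pvIsSp x == pvIsSp ' ') = (fun x : Char => x == ' ') := by
    funext x
    rw [pvIsSp, pvIsSp]
    cases h : (x == ' ') <;> simp
  rw [pvSplitChunks, hfun]
  rcases hl with rfl | ⟨c, t, rfl, hc⟩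
  · simp
  · have hc' : (c == ' ') = false := by simpa using hc
    simp [hc']

theorem pv_splitChunks_words (ws : List (List Char)) (w : List Char)
    (hw : pvGood w) (hws : ∀ u ∈ ws, pvGood u) :
    pvSplitChunks (w ++ ws.flatMap (fun u => ' ' :: u))
      = w :: ws.flatMap (fun u => [[' '], u]) := by
  induction ws generalizing w with
  | nil =>
    obtain ⟨hne, hsp, -⟩ := hw
    rcases w with _ | ⟨c, t⟩
    · exact absurd rfl hne
    · simp only [List.flatMap_nil, List.cons_append]
      rw [pv_chunks_word_step c t [] (hsp c (by simp)) (fun x hx => hsp x (by simp [hx]))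
        (Or.inl rfl)]
      simp [pvSplitChunks]
  | cons u ws ih =>
    obtain ⟨hne, hsp, -⟩ := hw
    rcases w with _ | ⟨c, t⟩
    · exact absurd rfl hne
    obtain ⟨c', t', hu⟩ : ∃ c' t', u = c' :: t' := by
      obtain ⟨hneu, -, -⟩ := hws u (by simp)
      cases u with
      | nil => exact absurd rfl hneu
      | cons a b => exact ⟨a, b, rfl⟩
    have hc' : c' ≠ ' ' := (hws u (by simp)).2.1 c' (by simp [hu])
    simp only [List.flatMap_cons, List.cons_append]
    rw [pv_chunks_word_step c t (' ' :: (u ++ ws.flatMap (fun v => ' ' :: v)))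
      (hsp c (by simp)) (fun x hx => hsp x (by simp [hx])) (Or.inr ⟨_, rfl⟩)]
    rw [pv_chunks_space_step (u ++ ws.flatMap (fun v => ' ' :: v))
      (Or.inr ⟨c', t' ++ ws.flatMap (fun v => ' ' :: v), by rw [hu]; simp, hc'⟩)]
    rw [ih u (hws u (by simp)) (fun v hv => hws v (by simp [hv]))]
    simp

-- the rendered text of one line of words
def pvRend (l : List (List Char)) : List Char := List.intercalate [' '] l

theorem pv_wsChunk_good (w : List Char) (hw : pvGood w) : pvWsChunk w = false := by
  obtain ⟨hne, hsp, -⟩ := hw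
  rcases w with _ | ⟨c, t⟩
  · exact absurd rfl hne
  · have : (c == ' ') = false := by simpa using hsp c (by simp)
    simp [pvWsChunk, pvIsSp, List.all_cons, this]

theorem pv_dropTrailWs_words (cur : List (List Char)) (h : ∀ u ∈ cur, pvGood u) (hne : cur ≠ []) :
    pvDropTrailWs (List.intersperse [' '] cur) = List.intersperse [' '] cur := by
  obtain ⟨last, hl⟩ : ∃ a, cur.getLast? = some a := by
    cases hq : cur.getLast? with
    | none => exact absurd (List.getLast?_eq_none_iff.mp hq) hne
    | some a => exact ⟨a, rfl⟩
  have hg := h last (List.mem_of_getLast? hl)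
  unfold pvDropTrailWs
  rw [pv_getLast?_intersperse, hl]
  simp [pv_wsChunk_good last hg]

theorem pv_isEmpty_false {α : Type} (l : List α) (h : l ≠ []) : l.isEmpty = false := by
  rcases l with _ | ⟨x, xs⟩
  · exact absurd rfl h
  · rfl

theorem pv_intersperse_isEmpty (curB : List (List Char)) (h : curB ≠ []) :
    (List.intersperse [' '] curB).isEmpty = false := by
  rcases curB with _ | ⟨x, xs⟩
  · exact absurd rfl h
  · cases xs <;> simp [List.intersperse]

theorem pv_dropTrailWs_concat_ws (l : List (List Char)) :
    pvDropTrailWs (l ++ [[' ']]) = l := by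
  unfold pvDropTrailWs
  rw [List.getLast?_concat]
  simp [pvWsChunk, pvIsSp]

theorem pvWrapCore_cons (width : Nat) (st : List (List Char) × List (List Char) × Nat)
    (c : List Char) (rest : List (List Char)) :
    pvWrapCore width st (c :: rest) = pvWrapCore width (pvStepA width st c) rest := by
  rw [pvWrapCore, pvWrapCore, List.foldl_cons]

theorem pvPackB_cons (st : List (List (List Char)) × List (List Char) × Nat)
    (n : List Char) (rest : List (List Char)) :
    pvPackB st (n :: rest) = pvPackB (pvStepB st n) rest := by
  rw [pvPackB, pvPackB, List.foldl_cons]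

-- the central correspondence: A's chunk loop tracks B's word loop line for line
theorem pv_main (ws : List (List Char)) :
    ∀ (linesB : List (List (List Char))) (curB : List (List Char)) (lenB : Nat),
    (∀ u ∈ ws, pvGood u) → (∀ u ∈ curB, pvGood u) → curB ≠ [] →
    pvWrapCore 33 (linesB.map pvRend, List.intersperse [' '] curB, lenB)
        (ws.flatMap (fun u => [[' '], u]))
      = (pvPackB (linesB, curB, lenB) ws).map pvRend := by
  induction ws with
  | nil =>
    intro linesB curB lenB hws hcur hne
    rw [List.flatMap_nil, pvWrapCore, List.foldl_nil, pvPackB, List.foldl_nil]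
    simp only
    rw [pv_dropTrailWs_words curB hcur hne, pv_intersperse_isEmpty curB hne,
      pv_isEmpty_false curB hne]
    simp only [Bool.false_eq_true, if_false]
    rw [List.map_append, pv_join_nil_eq_flatten]
    rfl
  | cons w ws ih =>
    intro linesB curB lenB hws hcur hne
    have hgw : pvGood w := hws w (by simp)
    have hws' : ∀ u ∈ ws, pvGood u := fun u hu => hws u (by simp [hu])
    rw [List.flatMap_cons, List.cons_append, List.cons_append, List.nil_append,
      pvWrapCore_cons, pvWrapCore_cons, pvPackB_cons]
    by_cases h1 : lenB + 1 + w.length ≤ 33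
    · -- the separator and the word both fit
      have e1 : pvStepA 33 (linesB.map pvRend, List.intersperse [' '] curB, lenB) [' ']
          = (linesB.map pvRend, List.intersperse [' '] curB ++ [[' ']], lenB + 1) := by
        rw [pvStepA]
        simp only [List.length_cons, List.length_nil]
        rw [if_pos (by omega)]
      have e2 : pvStepA 33 (linesB.map pvRend, List.intersperse [' '] curB ++ [[' ']], lenB + 1) w
          = (linesB.map pvRend, List.intersperse [' '] (curB ++ [w]), lenB + 1 + w.length) := by
        rw [pvStepA]
        rw [if_pos (by omega)]
        rw [pv_intersperse_concat [' '] curB w hne]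
        simp [Nat.add_assoc]
      have e3 : pvStepB (linesB, curB, lenB) w = (linesB, curB ++ [w], lenB + 1 + w.length) := by
        rw [pvStepB, if_neg (by simp [pv_isEmpty_false curB hne]), if_pos h1]
      rw [e1, e2, e3]
      exact ih linesB (curB ++ [w]) (lenB + 1 + w.length) hws'
        (by intro u hu; rcases List.mem_append.mp hu with h | h
            · exact hcur u h
            · simp at h; subst h; exact hgw)
        (by simp)
    · have e3 : pvStepB (linesB, curB, lenB) w = (linesB ++ [curB], [w], w.length) := by
        rw [pvStepB, if_neg (by simp [pv_isEmpty_false curB hne]), if_neg h1]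
      have etail : pvWrapCore 33
            ((linesB ++ [curB]).map pvRend, [w], w.length) (ws.flatMap (fun u => [[' '], u]))
          = (pvPackB (linesB ++ [curB], [w], w.length) ws).map pvRend := by
        have := ih (linesB ++ [curB]) [w] w.length hws'
          (by intro u hu; simp at hu; subst hu; exact hgw) (by simp)
        simpa [List.intersperse] using this
      by_cases h2 : lenB + 1 ≤ 33
      · -- the separator fits but the word does not: break at the word, drop the trailing space
        have e1 : pvStepA 33 (linesB.map pvRend, List.intersperse [' '] curB, lenB) [' ']
            = (linesB.map pvRend, List.intersperse [' '] curB ++ [[' ']], lenB + 1) := by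
          rw [pvStepA]
          simp only [List.length_cons, List.length_nil]
          rw [if_pos (by omega)]
        have e2 : pvStepA 33 (linesB.map pvRend, List.intersperse [' '] curB ++ [[' ']], lenB + 1) w
            = ((linesB ++ [curB]).map pvRend, [w], w.length) := by
          rw [pvStepA, if_neg (by omega)]
          simp only
          rw [pv_dropTrailWs_concat_ws]
          rw [pv_intersperse_isEmpty curB hne]
          simp only [Bool.false_eq_true, if_false]
          rw [pv_wsChunk_good w hgw]
          simp only [Bool.false_eq_true, if_false]
          rw [List.map_append, pv_join_nil_eq_flatten]
          rfl
        rw [e1, e2, e3, etail]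
      · -- not even the separator fits: break at the space, then start the new line with the word
        have e1 : pvStepA 33 (linesB.map pvRend, List.intersperse [' '] curB, lenB) [' ']
            = ((linesB ++ [curB]).map pvRend, [], 0) := by
          rw [pvStepA, if_neg (by simp; omega)]
          simp only
          rw [pv_dropTrailWs_words curB hcur hne, pv_intersperse_isEmpty curB hne]
          simp only [Bool.false_eq_true, if_false]
          rw [List.map_append, pv_join_nil_eq_flatten]
          have : pvWsChunk [' '] = true := by decide
          rw [this]
          simp only [if_true]
          rfl
        have e2 : pvStepA 33 ((linesB ++ [curB]).map pvRend, [], 0) w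
            = ((linesB ++ [curB]).map pvRend, [w], w.length) := by
          rw [pvStepA, if_pos (by have := hgw.2.2; omega)]
          simp
        rw [e1, e2, e3, etail]

-- replacing ' ' by ',' in a comma-free... space-separated line
theorem pv_go_single (fuel : Nat) : ∀ (l acc : List Char), l.length ≤ fuel →
    PySem.Chars.replace.go [' '] [','] fuel l acc
      = acc.reverse ++ l.map (fun c => if c = ' ' then ',' else c) := by
  induction fuel with
  | zero =>
    intro l acc h
    have : l = [] := List.eq_nil_of_length_eq_zero (Nat.le_zero.mp h)
    subst this
    simp [PySem.Chars.replace.go]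
  | succ f ih =>
    intro l acc h
    cases l with
    | nil => simp [PySem.Chars.replace.go]
    | cons c t =>
      rw [PySem.Chars.replace.go]
      by_cases hc : c = ' '
      · subst hc
        have hpre : [' '].isPrefixOf (' ' :: t) = true := by simp [List.isPrefixOf]
        simp only [hpre, if_true, List.length_cons, List.length_nil, List.drop_succ_cons, List.drop_zero]
        rw [ih t ([','].reverse ++ acc) (by simpa using Nat.le_of_succ_le_succ h)]
        simp
      · have hpre : [' '].isPrefixOf (c :: t) = false := by
          simp [List.isPrefixOf]
          exact fun h' => absurd h'.symm hc
        simp only [hpre]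
        rw [if_neg (by simp)]
        rw [ih t (c :: acc) (by simpa using Nat.le_of_succ_le_succ h)]
        simp [hc]

theorem pv_replace_single (s : List Char) :
    PySem.Chars.replace s [' '] [','] = s.map (fun c => if c = ' ' then ',' else c) := by
  rw [PySem.Chars.replace]
  rw [if_neg (by simp)]
  rw [pv_go_single s.length s [] le_rfl]
  simp

theorem pv_replace_rend (l : List (List Char)) (h : ∀ u ∈ l, pvGood u) :
    PySem.Chars.replace (pvRend l) [' '] [','] = PySem.Chars.join [','] l := by
  rw [pv_replace_single]
  have hmap : ∀ u ∈ l, u.map (fun c => if c = ' ' then ',' else c) = u := by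
    intro u hu
    have hsp := (h u hu).2.1
    rw [List.map_congr_left (fun c hc => if_neg (hsp c hc))]
    exact List.map_id u
  calc (pvRend l).map (fun c => if c = ' ' then ',' else c)
      = ((List.intersperse [' '] l).map (List.map (fun c => if c = ' ' then ',' else c))).flatten := by
        rw [pvRend, List.intercalate, List.map_flatten]
    _ = (List.intersperse [','] (l.map (List.map (fun c => if c = ' ' then ',' else c)))).flatten := by
        rw [pv_map_intersperse]; norm_num
    _ = (List.intersperse [','] l).flatten := by rw [List.map_congr_left hmap]; simp
    _ = PySem.Chars.join [','] l := rfl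

-- words appearing in B's packed lines all come from the input words
theorem pvPackB_good (ws : List (List Char)) :
    ∀ (linesB : List (List (List Char))) (curB : List (List Char)) (lenB : Nat),
    (∀ l ∈ linesB, ∀ u ∈ l, pvGood u) → (∀ u ∈ curB, pvGood u) → (∀ u ∈ ws, pvGood u) →
    ∀ l ∈ pvPackB (linesB, curB, lenB) ws, ∀ u ∈ l, pvGood u := by
  induction ws with
  | nil =>
    intro linesB curB lenB hl hc hw l hl' u hu
    by_cases he : curB.isEmpty = true
    · simp only [pvPackB, List.foldl_nil, he, if_true] at hl'
      exact hl l hl' u hu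
    · simp only [pvPackB, List.foldl_nil, he, Bool.false_eq_true, if_false] at hl'
      rcases List.mem_append.mp hl' with h | h
      · exact hl l h u hu
      · simp at h; subst h; exact hc u hu
  | cons w ws ih =>
    intro linesB curB lenB hl hc hw
    have hgw : pvGood w := hw w (by simp)
    have hw' : ∀ u ∈ ws, pvGood u := fun u hu => hw u (by simp [hu])
    rw [pvPackB_cons]
    by_cases he : curB.isEmpty = true
    · have e : pvStepB (linesB, curB, lenB) w = (linesB, [w], w.length) := by
        rw [pvStepB, if_pos he]
      rw [e]
      exact ih linesB [w] w.length hl (by intro u hu; simp at hu; subst hu; exact hgw) hw'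
    · by_cases hfit : lenB + 1 + w.length ≤ 33
      · have e : pvStepB (linesB, curB, lenB) w = (linesB, curB ++ [w], lenB + 1 + w.length) := by
          rw [pvStepB, if_neg he, if_pos hfit]
        rw [e]
        refine ih linesB (curB ++ [w]) _ hl ?_ hw'
        intro u hu
        rcases List.mem_append.mp hu with h | h
        · exact hc u h
        · simp at h; subst h; exact hgw
      · have e : pvStepB (linesB, curB, lenB) w = (linesB ++ [curB], [w], w.length) := by
          rw [pvStepB, if_neg he, if_neg hfit]
        rw [e]
        refine ih (linesB ++ [curB]) [w] _ ?_ (by intro u hu; simp at hu; subst hu; exact hgw) hw'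
        intro l hl' u hu
        rcases List.mem_append.mp hl' with h | h
        · exact hl l h u hu
        · simp at h; subst h; exact hc u hu

-- ===== VERDICT (by name: the statement is the Claim_ definition above) =====
theorem calc_text_spec : Claim_equal_calc_text := by
  unfold Claim_equal_calc_text
  intro byte_data hdom
  unfold Spec_calc_text
  have hgood : ∀ n ∈ byte_data, pvGood (PySem.Int.toChars n) := by
    intro n hn
    exact pvGood_toChars n (List.all_eq_true.mp hdom n hn)
  have hD : ("DATA ".toList).length = 5 := by decide
  cases byte_data with
  | nil =>
    simp [calc_text, calc_text_alt, pvSplitChunks, pvWrapCore, pvPackB, pvDropTrailWs,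
      PySem.Chars.join, List.intercalate]
  | cons b bs =>
    have hgw : pvGood (PySem.Int.toChars b) := hgood b (by simp)
    have hgws : ∀ u ∈ bs.map (fun i => PySem.Int.toChars i), pvGood u := by
      intro u hu
      obtain ⟨n, hn, rfl⟩ := List.mem_map.mp hu
      exact hgood n (by simp [hn])
    rw [calc_text, calc_text_alt]
    simp only [hD, List.map_cons]
    have hval : PySem.Chars.join [' ']
        (PySem.Int.toChars b :: bs.map (fun i => PySem.Int.toChars i))
        = PySem.Int.toChars b
          ++ (bs.map (fun i => PySem.Int.toChars i)).flatMap (fun u => ' ' :: u) := by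
      rw [PySem.Chars.join, pv_intercalate_words]
    rw [hval, pv_splitChunks_words _ _ hgw hgws]
    have h38 : 38 - 5 = 33 := by norm_num
    rw [h38, pvWrapCore_cons]
    have e0 : pvStepA 33 ([], [], 0) (PySem.Int.toChars b)
        = ([], [PySem.Int.toChars b], (PySem.Int.toChars b).length) := by
      rw [pvStepA, if_pos (by have := hgw.2.2; omega)]
      simp
    rw [e0]
    have hmain := pv_main (bs.map (fun i => PySem.Int.toChars i)) [] [PySem.Int.toChars b]
      (PySem.Int.toChars b).length hgws
      (by intro u hu; simp at hu; subst hu; exact hgw) (by simp)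
    simp only [List.map_nil, List.intersperse] at hmain
    rw [hmain]
    rw [pvPackB_cons]
    have e0b : pvStepB ([], [], 0) (PySem.Int.toChars b)
        = ([], [PySem.Int.toChars b], (PySem.Int.toChars b).length) := by
      simp [pvStepB]
    rw [e0b]
    have hlines := pvPackB_good (bs.map (fun i => PySem.Int.toChars i)) []
      [PySem.Int.toChars b] (PySem.Int.toChars b).length (by simp)
      (by intro u hu; simp at hu; subst hu; exact hgw) hgws
    rw [List.map_map]
    refine congrArg String.ofList (congrArg (PySem.Chars.join ['\n']) (List.map_congr_left ?_))
    intro l hl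
    simp only [Function.comp]
    rw [pv_replace_rend l (hlines l hl)]
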